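-- pv_equiv track=rewrite | github.com/hacker0limbo/codewars-practice | python/2018.7.30/index.py | printer_error
-- ===== SOURCE A (Python) =====
-- def printer_error(str):
--     valid_str = 'abcdefghijklmn'
--     not_valid_num = 0
--     for i in str:
--         if i not in valid_str:
--             not_valid_num += 1
--     result = f'{not_valid_num}/{len(str)}'
--     return result
-- ===== SOURCE B (Python) =====
-- def printer_error(str):
--     valid_str = 'abcdefghijklmn'
--     freq = {}
--     for ch in str:
--         freq[ch] = freq.get(ch, 0) + 1
--     total = 0
--     for ch, n in freq.items():
--         if ch not in valid_str:
--             total += n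
--     return '{}/{}'.format(total, len(str))
-- ===== Notes on version B (the rewrite author's own statement) =====
-- stated objective: alternative
-- what changed: B first builds a character-frequency dictionary in one pass and then sums the counts over the distinct keys that are not valid letters, instead of testing every character of the string directly.
import Mathlib
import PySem

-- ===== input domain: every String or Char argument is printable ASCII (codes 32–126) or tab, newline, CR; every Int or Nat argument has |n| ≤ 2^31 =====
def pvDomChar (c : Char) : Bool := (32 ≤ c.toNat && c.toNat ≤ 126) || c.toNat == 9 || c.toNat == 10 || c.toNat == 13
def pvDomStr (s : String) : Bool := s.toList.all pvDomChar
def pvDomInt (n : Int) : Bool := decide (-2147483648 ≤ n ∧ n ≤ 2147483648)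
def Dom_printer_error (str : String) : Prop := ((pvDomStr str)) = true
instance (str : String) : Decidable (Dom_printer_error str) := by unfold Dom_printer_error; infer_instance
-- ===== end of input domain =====

-- B counts via a frequency dictionary over distinct characters instead of testing each character; same result, alternative decomposition.

-- ===== PORT A =====
def printer_error (str : String) : String :=
  let valid_str : String := "abcdefghijklmn"
  let not_valid_num : Int :=
    str.toList.foldl (fun n i => if valid_str.toList.contains i then n else n + 1) 0
  PySem.Int.toStr not_valid_num ++ "/" ++ PySem.Int.toStr (PySem.Str.len str)

-- ===== PORT B =====
def printer_error_alt (str : String) : String :=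
  let valid_str : String := "abcdefghijklmn"
  let freq : PySem.Dict Char Int :=
    str.toList.foldl (fun d ch => d.insert ch (d.getD ch 0 + 1)) PySem.Dict.empty
  let total : Int :=
    freq.items.foldl (fun t kv => if !(valid_str.toList.contains kv.1) then t + kv.2 else t) 0
  PySem.Int.toStr total ++ "/" ++ PySem.Int.toStr (PySem.Str.len str)

-- ===== PRECONDITION & SPEC =====
def Spec_printer_error (str : String) (out : String) : Prop := out = printer_error_alt str
instance (str : String) (out : String) : Decidable (Spec_printer_error str out) := by unfold Spec_printer_error; infer_instance

-- ===== CLAIM (what is proved, stated in full; the proofs are below) =====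
def Claim_equal_printer_error : Prop := ∀ (str : String), Dom_printer_error str → Spec_printer_error str (printer_error str)

-- ===== LEMMAS AND PROOFS =====

-- A's loop is a countP of the invalid characters.
theorem pvFoldlA (c : Char → Bool) : ∀ (l : List Char) (a : Int),
    l.foldl (fun n i => if c i then n else n + 1) a
      = a + ((l.countP (fun i => !c i) : Nat) : Int) := by
  intro l
  induction l with
  | nil => intro a; simp
  | cons x l ih =>
    intro a
    rw [List.foldl_cons, ih, List.countP_cons]
    by_cases h : c x <;> simp [h] <;> omega

-- B's loop is the sum of the second components of the kept pairs.
theorem pvFoldlB (c : Char → Bool) : ∀ (xs : List (Char × Int)) (a : Int),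
    xs.foldl (fun t kv => if !(c kv.1) then t + kv.2 else t) a
      = a + ((xs.filter (fun kv => !(c kv.1))).map Prod.snd).sum := by
  intro xs
  induction xs with
  | nil => intro a; simp
  | cons kv xs ih =>
    intro a
    rw [List.foldl_cons, ih, List.filter_cons]
    by_cases h : c kv.1 <;> simp [h] <;> ring

theorem pvMapFilterSnd (c : Char → Bool) (g : Char → Int) : ∀ (S : List Char),
    (((S.map (fun k => (k, g k))).filter (fun kv => !(c kv.1))).map Prod.snd)
      = (S.filter (fun k => !(c k))).map g := by
  intro S
  induction S with
  | nil => rfl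
  | cons x S ih =>
    by_cases h : c x <;> simp [h, ih]

theorem pvSumIndicator {α : Type} [DecidableEq α] (x : α) : ∀ (m : List α),
    (m.map (fun k => if k = x then (1 : Int) else 0)).sum = m.count x := by
  intro m
  induction m with
  | nil => simp
  | cons y m ih =>
    rw [List.map_cons, List.sum_cons, ih, List.count_cons]
    by_cases h : y = x
    · subst h; simp; omega
    · simp [h]

-- Summing counts over the distinct keys satisfying p recovers countP.
theorem pvSumCount {α : Type} [DecidableEq α] (p : α → Bool) (ks : List α)
    (hnd : ks.Nodup) : ∀ (l : List α), (∀ x ∈ l, x ∈ ks) →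
    ((ks.filter p).map (fun k => (l.count k : Int))).sum = ((l.countP p : Nat) : Int) := by
  intro l
  induction l with
  | nil => intro _; simp
  | cons x l ih =>
    intro hmem
    have hx : x ∈ ks := hmem x (by simp)
    have hl : ∀ y ∈ l, y ∈ ks := fun y hy => hmem y (by simp [hy])
    have hsplit : ((ks.filter p).map (fun k => ((x :: l).count k : Int))).sum
        = ((ks.filter p).map (fun k => (l.count k : Int))).sum
          + ((ks.filter p).map (fun k => if k = x then (1 : Int) else 0)).sum := by
      induction ks.filter p with
      | nil => simp
      | cons k m ihm =>
        simp only [List.map_cons, List.sum_cons, ihm]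
        rw [List.count_cons]
        by_cases h : k = x
        · subst h; simp; omega
        · simp only [h, if_false]
          have : ¬ x = k := fun hh => h hh.symm
          simp [this]; ring
    rw [hsplit, ih hl, pvSumIndicator x (ks.filter p)]
    have hcnt : ((ks.filter p).count x : Int) = if p x then 1 else 0 := by
      by_cases h : p x
      · have : x ∈ ks.filter p := List.mem_filter.mpr ⟨hx, h⟩
        rw [List.count_eq_one_of_mem (hnd.filter p) this]
        simp [h]
      · have : x ∉ ks.filter p := by
          intro hc
          exact h (List.mem_filter.mp hc).2
        rw [List.count_eq_zero_of_not_mem this]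
        simp [h]
    rw [hcnt, List.countP_cons]
    by_cases h : p x <;> simp [h]

theorem pvTotalEq (c : Char → Bool) (l : List Char) :
    ((PySem.Dict.counter l).items.foldl
        (fun t kv => if !(c kv.1) then t + kv.2 else t) (0 : Int))
      = ((l.countP (fun i => !c i) : Nat) : Int) := by
  rw [pvFoldlB, PySem.Dict.items_counter,
    pvMapFilterSnd c (fun k => (l.count k : Int)) (PySem.Set.ofList l)]
  simp only [zero_add]
  exact pvSumCount (fun i => !c i) (PySem.Set.ofList l) (PySem.Set.nodup_ofList l) l
    (fun x hx => (PySem.Set.mem_ofList l x).mpr hx)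

-- ===== VERDICT (by name: the statement is the Claim_ definition above) =====
theorem printer_error_spec : Claim_equal_printer_error := by
  intro str _
  unfold Spec_printer_error printer_error printer_error_alt
  simp only
  rw [PySem.Dict.foldl_insert_getD_add_one_eq_counter,
    pvTotalEq (fun i => ("abcdefghijklmn".toList.contains i)) str.toList,
    pvFoldlA (fun i => ("abcdefghijklmn".toList.contains i)) str.toList 0]
  simp
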